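-- pv_equiv track=rewrite | github.com/relsunkaev/rsloop | benchmarks/loops.py | split_weighted
-- ===== SOURCE A (Python) =====
-- def split_evenly(total: int, buckets: int) -> list[int]:
--     if buckets <= 0:
--         raise ValueError("buckets must be positive")
--     base, remainder = divmod(total, buckets)
--     return [base + (1 if index < remainder else 0) for index in range(buckets)]
--
-- def split_weighted(total: int, weights: list[int]) -> list[int]:
--     if not weights or any(weight < 0 for weight in weights):
--         raise ValueError("weights must be non-empty and non-negative")
--     weight_total = sum(weights)
--     if weight_total == 0:
--         return split_evenly(total, len(weights))
--     counts = [(total * weight) // weight_total for weight in weights]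
--     remaining = total - sum(counts)
--     ranked = sorted(
--         range(len(weights)),
--         key=lambda index: (weights[index], -index),
--         reverse=True,
--     )
--     for index in ranked[:remaining]:
--         counts[index] += 1
--     return counts
-- ===== SOURCE B (Python) =====
-- def split_weighted(total: int, weights: list[int]) -> list[int]:
--     if not weights or any(weight < 0 for weight in weights):
--         raise ValueError("weights must be non-empty and non-negative")
--     n = len(weights)
--     weight_total = sum(weights)
--     if weight_total == 0:
--         counts = [total // n] * n
--     else:
--         counts = [(total * weight) // weight_total for weight in weights]
--     remaining = total - sum(counts)
--     result = []
--     for i, count in enumerate(counts):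
--         # number of indices strictly ahead of i in (weight desc, index asc) order
--         ahead = 0
--         for j, wj in enumerate(weights):
--             if wj > weights[i] or (wj == weights[i] and j < i):
--                 ahead += 1
--         result.append(count + 1 if ahead < remaining else count)
--     return result
-- ===== Notes on version B (the rewrite author's own statement) =====
-- stated objective: alternative
-- what changed: Replaces sorting all indices and bumping a prefix with a per-index pairwise rank count (how many indices are strictly ahead in (weight desc, index asc) order, bump iff rank < remaining), and folds the zero-weight-total case into the same leftover-distribution formula.
import Mathlib
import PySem

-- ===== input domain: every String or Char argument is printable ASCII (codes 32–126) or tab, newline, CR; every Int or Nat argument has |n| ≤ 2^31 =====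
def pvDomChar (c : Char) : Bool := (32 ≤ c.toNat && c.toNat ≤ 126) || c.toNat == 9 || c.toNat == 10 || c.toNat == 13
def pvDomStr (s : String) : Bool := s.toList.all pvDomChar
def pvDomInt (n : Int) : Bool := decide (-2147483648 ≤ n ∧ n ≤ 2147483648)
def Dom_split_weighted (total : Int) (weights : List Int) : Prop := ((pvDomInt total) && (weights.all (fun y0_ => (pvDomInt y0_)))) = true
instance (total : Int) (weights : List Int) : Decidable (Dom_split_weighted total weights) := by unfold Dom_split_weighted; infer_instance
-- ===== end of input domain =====

-- B replaces A's sort-all-indices-and-bump-a-prefix with a per-index pairwise rank count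
-- (bump counts[i] iff the number of indices strictly ahead of i in (weight desc, index asc)
-- order is < remaining) and folds the zero-weight-total case into the same leftover formula;
-- an alternative decomposition, not claimed faster.

-- ===== PORT A =====
def split_evenly (total : Int) (buckets : Int) : List Int :=
  if buckets ≤ 0 then []   -- Python: raise ValueError (Pre_ makes this unreachable at the call site)
  else
    match PySem.Int.divmod? total buckets with
    | none => []           -- unreachable: buckets > 0 here
    | some (base, remainder) =>
        (PySem.List.pyRange 0 buckets).map (fun index => base + (if index < remainder then 1 else 0))

def split_weighted (total : Int) (weights : List Int) : List Int :=
  if weights = [] ∨ weights.any (fun weight => decide (weight < 0)) then []   -- Python: raise ValueError (excluded by Pre_)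
  else
    let weight_total := weights.sum
    if weight_total = 0 then split_evenly total (weights.length : Int)
    else
      let counts := weights.map (fun weight => PySem.Int.floordiv (total * weight) weight_total)
      let remaining := total - counts.sum
      let ranked := PySem.List.sorted2 (PySem.List.pyRange 0 (weights.length : Int))
          (fun index => PySem.List.pyGetD weights index 0) (fun index => -index) true
      (PySem.List.slice ranked none (some remaining)).foldl
        (fun counts index => PySem.List.pySetD counts index (PySem.List.pyGetD counts index 0 + 1)) counts

-- ===== PORT B =====
def split_weighted_alt (total : Int) (weights : List Int) : List Int :=
  if weights = [] ∨ weights.any (fun weight => decide (weight < 0)) then []   -- Python: raise ValueError (excluded by Pre_)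
  else
    let n : Int := (weights.length : Int)
    let weight_total := weights.sum
    let counts :=
      if weight_total = 0 then PySem.List.pyRepeat [PySem.Int.floordiv total n] n
      else weights.map (fun weight => PySem.Int.floordiv (total * weight) weight_total)
    let remaining := total - counts.sum
    (PySem.List.enumerate counts).foldl
      (fun result ic =>
        let ahead := (PySem.List.enumerate weights).foldl
          (fun ahead jw =>
            if PySem.List.pyGetD weights ic.1 0 < jw.2 ∨
               (jw.2 = PySem.List.pyGetD weights ic.1 0 ∧ jw.1 < ic.1)
            then ahead + 1 else ahead) 0
        result ++ [if ahead < remaining then ic.2 + 1 else ic.2]) []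

-- ===== PRECONDITION & SPEC =====
-- Pre_ excludes exactly the inputs on which Python A raises ValueError: empty weights or a negative weight.
def Pre_split_weighted (total : Int) (weights : List Int) : Prop :=
  weights ≠ [] ∧ ∀ w ∈ weights, 0 ≤ w
instance (total : Int) (weights : List Int) : Decidable (Pre_split_weighted total weights) := by unfold Pre_split_weighted; infer_instance
def pvWitness_split_weighted : Int × List Int := (5, [1, 2, 3])

def Spec_split_weighted (total : Int) (weights : List Int) (out : List Int) : Prop := out = split_weighted_alt total weights
instance (total : Int) (weights : List Int) (out : List Int) : Decidable (Spec_split_weighted total weights out) := by unfold Spec_split_weighted; infer_instance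

-- ===== CLAIM (what is proved, stated in full; the proofs are below) =====
def Claim_equal_split_weighted : Prop := ∀ (total : Int) (weights : List Int), Dom_split_weighted total weights → Pre_split_weighted total weights → Spec_split_weighted total weights (split_weighted total weights)

-- ===== LEMMAS AND PROOFS =====
def befB (weights : List Int) (a b : Int) : Bool :=
  decide (PySem.List.pyGetD weights b 0 < PySem.List.pyGetD weights a 0) ||
  (!decide (PySem.List.pyGetD weights a 0 < PySem.List.pyGetD weights b 0) && decide (-b < -a))
theorem befB_trans {weights : List Int} {a b c : Int}
    (h1 : befB weights a b = true) (h2 : befB weights b c = true) : befB weights a c = true := by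
  simp [befB] at *; omega
theorem befB_total {weights : List Int} {a b : Int} (hne : a ≠ b)
    (h : befB weights a b = false) : befB weights b a = true := by
  simp [befB] at *; omega
theorem insertBy_pairwise (weights : List Int) (x : Int) (acc : List Int)
    (hx : x ∉ acc) (hp : acc.Pairwise (fun a b => befB weights a b = true)) :
    (PySem.List.insertBy (befB weights) x acc).Pairwise (fun a b => befB weights a b = true) := by
  induction acc with
  | nil => simp [PySem.List.insertBy]
  | cons y ys ih =>
    simp only [List.mem_cons, not_or] at hx
    rw [List.pairwise_cons] at hp
    rw [PySem.List.insertBy]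
    by_cases hb : befB weights x y = true
    · simp only [hb, if_true]
      refine List.Pairwise.cons ?_ (List.Pairwise.cons hp.1 hp.2)
      intro z hz
      rcases List.mem_cons.mp hz with rfl | hz
      · exact hb
      · exact befB_trans hb (hp.1 z hz)
    · simp only [hb, if_false]
      refine List.Pairwise.cons ?_ (ih hx.2 hp.2)
      intro z hz
      rcases (PySem.List.mem_insertBy _ _ _ _).mp hz with rfl | hz
      · exact befB_total hx.1 (Bool.eq_false_iff.mpr hb)
      · exact hp.1 z hz
theorem befB_asym {weights : List Int} {a b : Int} (h : befB weights a b = true) :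
    befB weights b a = false := by
  simp [befB] at *; omega
theorem befB_irrefl (weights : List Int) (a : Int) : befB weights a a = false := by
  simp [befB]
theorem foldl_insertBy_pairwise (weights : List Int) :
    ∀ (xs acc : List Int), (∀ x ∈ xs, x ∉ acc) → xs.Nodup →
    acc.Pairwise (fun a b => befB weights a b = true) →
    (xs.foldl (fun a x => PySem.List.insertBy (befB weights) x a) acc).Pairwise
      (fun a b => befB weights a b = true)
  | [], acc, _, _, hp => hp
  | x :: xs, acc, hdisj, hnd, hp => by
    rw [List.foldl_cons]
    rcases List.nodup_cons.mp hnd with ⟨hxx, hnd'⟩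
    refine foldl_insertBy_pairwise weights xs _ ?_ hnd'
      (insertBy_pairwise weights x acc (hdisj x (by simp)) hp)
    intro y hy hmem
    rcases (PySem.List.mem_insertBy _ _ _ _).mp hmem with rfl | hm
    · exact hxx hy
    · exact hdisj y (by simp [hy]) hm
theorem mem_take_iff_rank (weights : List Int) (L : List Int) (hnd : L.Nodup)
    (hpw : L.Pairwise (fun a b => befB weights a b = true)) (i : Int) (hi : i ∈ L) (r : Nat) :
    i ∈ L.take r ↔ L.countP (fun j => befB weights j i) < r := by
  obtain ⟨P, S, rfl⟩ := List.append_of_mem hi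
  have hps := List.pairwise_append.mp hpw
  have hcP : P.countP (fun j => befB weights j i) = P.length :=
    List.countP_eq_length.mpr (fun j hj => hps.2.2 j hj i (by simp))
  have hcS : S.countP (fun j => befB weights j i) = 0 :=
    List.countP_eq_zero.mpr (fun j hj => by
      simpa using befB_asym ((List.pairwise_cons.mp hps.2.1).1 j hj))
  have hiP : i ∉ P := by
    have := (List.nodup_append.mp hnd).2.2
    intro hin; exact this i hin i (by simp) rfl
  have hcount : (P ++ i :: S).countP (fun j => befB weights j i) = P.length := by
    simp [List.countP_append, List.countP_cons, hcP, hcS, befB_irrefl]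
  rw [hcount, List.take_append]
  constructor
  · intro hmem
    rcases List.mem_append.mp hmem with h | h
    · exact absurd (List.mem_of_mem_take h) hiP
    · rcases Nat.lt_or_ge P.length r with h' | h'
      · exact h'
      · simp [Nat.sub_eq_zero_of_le h'] at h
  · intro hlt
    apply List.mem_append.mpr; right
    have : r - P.length = (r - P.length - 1) + 1 := by omega
    rw [this, List.take_succ_cons]
    simp
theorem enumerate_int (xs : List Int) : ∀ (s : Int),
    PySem.List.enumerate xs s = (List.range xs.length).map (fun (k : Nat) => (s + (k : Int), xs.getD k 0)) := by
  induction xs with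
  | nil => intro s; simp [PySem.List.enumerate]
  | cons x t ih =>
      intro s
      rw [PySem.List.enumerate, ih]
      simp [List.range_succ_eq_map, List.map_map, Function.comp_def]
      intro a _
      push_cast; ring
theorem countP_range_lt (k : Nat) : ∀ (n : Nat),
    (List.range n).countP (fun (j : Nat) => decide ((j : Int) < (k : Int))) = min k n
  | 0 => by simp
  | n+1 => by
    rw [List.range_succ, List.countP_append, countP_range_lt k n]
    simp only [List.countP_singleton]
    by_cases h : n < k
    · simp [h]; omega
    · simp [h]; omega
theorem incr_fold (T : List Int) : ∀ (cnts : List Int), T.Nodup →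
    (∀ t ∈ T, 0 ≤ t ∧ t < (cnts.length : Int)) →
    T.foldl (fun c idx => PySem.List.pySetD c idx (PySem.List.pyGetD c idx 0 + 1)) cnts
      = (List.range cnts.length).map (fun k => cnts.getD k 0 + if ((k : Int) ∈ T) then 1 else 0) := by
  induction T with
  | nil =>
    intro cnts _ _
    simp only [List.foldl_nil, List.not_mem_nil, if_false, add_zero]
    apply List.ext_getElem (by simp)
    intro k h1 h2
    simp only [List.getElem_map, List.getElem_range, List.getD_eq_getElem?_getD]
    rw [List.getElem?_eq_getElem h1]
    rfl
  | cons t T ih =>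
    intro cnts hnd hrange
    rcases List.nodup_cons.mp hnd with ⟨htT, hnd'⟩
    obtain ⟨ht0, htlen⟩ := hrange t (by simp)
    rw [List.foldl_cons, PySem.List.pySetD_of_nonneg _ _ ht0,
        PySem.List.pyGetD_of_nonneg _ _ ht0,
        ih _ hnd' (by intro x hx; simpa [List.length_set] using hrange x (by simp [hx]))]
    simp only [List.length_set]
    apply List.map_congr_left
    intro k hk
    rw [List.mem_range] at hk
    have hts : t.toNat < cnts.length := by omega
    by_cases hkt : k = t.toNat
    · have hkt' : (k : Int) = t := by omega
      subst hkt
      simp [hkt', List.getD_eq_getElem?_getD, List.getElem?_set, hts, htT,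
        List.getElem?_eq_getElem hts]
    · have hne : ((k : Int) ≠ t) := by omega
      have : (cnts.set t.toNat (cnts.getD t.toNat 0 + 1)).getD k 0 = cnts.getD k 0 := by
        simp [List.getD_eq_getElem?_getD, List.getElem?_set, Ne.symm hkt]
      rw [this]
      simp [List.mem_cons, hne]

theorem getD_cast (weights : List Int) (j : Nat) :
    PySem.List.pyGetD weights (j : Int) 0 = weights.getD j 0 := by
  rw [PySem.List.pyGetD_of_nonneg _ _ (by positivity)]
  simp

-- B's whole body (past the guard) as a map over range
theorem alt_as_map (total : Int) (weights : List Int) (counts : List Int) (remaining : Int) :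
    (PySem.List.enumerate counts).foldl
      (fun result ic =>
        let ahead := (PySem.List.enumerate weights).foldl
          (fun ahead jw =>
            if PySem.List.pyGetD weights ic.1 0 < jw.2 ∨
               (jw.2 = PySem.List.pyGetD weights ic.1 0 ∧ jw.1 < ic.1)
            then ahead + 1 else ahead) 0
        result ++ [if ahead < remaining then ic.2 + 1 else ic.2]) []
    = (List.range counts.length).map (fun (k : Nat) =>
        if ((List.range weights.length).countP (fun (j : Nat) =>
              decide (weights.getD k 0 < weights.getD j 0 ∨
                (weights.getD j 0 = weights.getD k 0 ∧ (j : Int) < (k : Int)))) : Int) < remaining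
        then counts.getD k 0 + 1 else counts.getD k 0) := by
  rw [PySem.List.foldl_append_singleton_eq_map, enumerate_int counts, List.map_map]
  apply List.map_congr_left
  intro k hk
  simp only [Function.comp_def]
  rw [enumerate_int weights, PySem.List.foldl_ite_add_one
    (p := fun jw : Int × Int => PySem.List.pyGetD weights (0 + (k:Int)) 0 < jw.2 ∨
      (jw.2 = PySem.List.pyGetD weights (0 + (k:Int)) 0 ∧ jw.1 < 0 + (k:Int))), List.countP_map]
  simp only [zero_add, getD_cast, Function.comp_def]


theorem main_eq (total : Int) (weights : List Int)
    (hne : weights ≠ []) (hnn : ∀ w ∈ weights, 0 ≤ w) :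
    split_weighted total weights = split_weighted_alt total weights := by
  have hlen : 0 < weights.length := List.length_pos_of_ne_nil hne
  have h : ¬(weights = [] ∨ weights.any (fun weight => decide (weight < 0)) = true) := by
    simp only [not_or, List.any_eq_true, decide_eq_true_eq, not_exists]
    refine ⟨hne, ?_⟩
    intro w
    intro hcon
    rcases hcon with ⟨hw, hlt⟩
    exact absurd (hnn w hw) (not_le.mpr hlt)
  simp only [split_weighted, split_weighted_alt, if_neg h]
  by_cases hW : weights.sum = 0
  · -- all weights are zero; both sides distribute total evenly
    rw [if_pos hW, if_pos hW, alt_as_map total weights _ _]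
    have hz0 : ∀ (j : Nat), weights.getD j 0 = 0 := by
      intro j
      rcases Nat.lt_or_ge j weights.length with hj | hj
      · rw [List.getD_eq_getElem?_getD, List.getElem?_eq_getElem hj]
        have hmem : weights[j] ∈ weights := List.getElem_mem hj
        have h1 := hnn _ hmem
        have h2 := List.single_le_sum hnn _ hmem
        simp; omega
      · rw [List.getD_eq_getElem?_getD, List.getElem?_eq_none (by omega)]; rfl
    rw [split_evenly, if_neg (by push_cast; omega)]
    have hne0 : (weights.length : Int) ≠ 0 := by push_cast; omega
    simp only [PySem.Int.divmod?, hne0, if_false, PySem.List.pyRepeat_singleton]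
    rw [PySem.List.pyRange_zero_natCast, List.map_map]
    have hlrep : (List.replicate ((weights.length : Int)).toNat
        (PySem.Int.floordiv total (weights.length : Int))).length = weights.length := by simp
    rw [hlrep]
    apply List.map_congr_left
    intro k hk
    rw [List.mem_range] at hk
    have hgd : (List.replicate ((weights.length : Int)).toNat
        (PySem.Int.floordiv total (weights.length : Int))).getD k 0
        = PySem.Int.floordiv total (weights.length : Int) := by
      rw [List.getD_eq_getElem?_getD, List.getElem?_replicate]
      simp [hk]
    have hsum : (List.replicate ((weights.length : Int)).toNat
        (PySem.Int.floordiv total (weights.length : Int))).sum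
        = (weights.length : Int) * PySem.Int.floordiv total (weights.length : Int) := by
      rw [List.sum_replicate]
      simp [nsmul_eq_mul]
    have hmodrw : total - (weights.length : Int) * PySem.Int.floordiv total (weights.length : Int)
        = Int.fmod total (weights.length : Int) := by
      have hh := PySem.Int.floordiv_mul_add_mod total (weights.length : Int)
      have hcomm : (weights.length : Int) * PySem.Int.floordiv total (weights.length : Int)
          = PySem.Int.floordiv total (weights.length : Int) * (weights.length : Int) := mul_comm _ _
      simp only [PySem.Int.mod] at hh
      omega
    have hcnt : (List.range weights.length).countP (fun (j : Nat) =>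
        decide (weights.getD k 0 < weights.getD j 0 ∨
          (weights.getD j 0 = weights.getD k 0 ∧ (j : Int) < (k : Int)))) = k := by
      rw [List.countP_congr (q := fun (j : Nat) => decide ((j : Int) < (k : Int)))
        (by
          intro j hj
          have hz0' : ∀ (j : Nat), weights[j]?.getD 0 = 0 := by
            intro j; rw [← List.getD_eq_getElem?_getD]; exact hz0 j
          simp [hz0'])]
      rw [countP_range_lt]
      omega
    rw [hcnt, hgd, hsum, hmodrw]
    simp only [Function.comp_def, PySem.Int.floordiv]
    split_ifs with h1 h2 h2 <;> omega
  · -- positive weight total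
    rw [if_neg hW, if_neg hW, alt_as_map total weights _ _]
    have hWpos : 0 < weights.sum := lt_of_le_of_ne (List.sum_nonneg hnn) (Ne.symm hW)
    set counts := weights.map (fun weight => PySem.Int.floordiv (total * weight) weights.sum) with hcdef
    have cl : counts.length = weights.length := by simp [hcdef]
    have hrem : 0 ≤ total - counts.sum := by
      have h1 : ∀ w ∈ weights, weights.sum * PySem.Int.floordiv (total * w) weights.sum ≤ total * w := by
        intro w hw
        have hmod0 : 0 ≤ PySem.Int.mod (total * w) weights.sum := by
          rw [PySem.Int.mod_eq_emod_of_pos hWpos]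
          exact Int.emod_nonneg _ hW
        have hh := PySem.Int.floordiv_mul_add_mod (total * w) weights.sum
        have hcomm : weights.sum * PySem.Int.floordiv (total * w) weights.sum
            = PySem.Int.floordiv (total * w) weights.sum * weights.sum := mul_comm _ _
        omega
      have h2 := List.sum_le_sum h1
      rw [List.sum_map_mul_left] at h2
      have h3 : (List.map (fun w => total * w) weights).sum = total * weights.sum := by
        rw [List.sum_map_mul_left]
        simp
      rw [h3, mul_comm total weights.sum] at h2
      have h4 : counts.sum ≤ total := Int.le_of_mul_le_mul_left h2 hWpos
      omega
    have hidx : PySem.List.pyRange 0 (weights.length : Int)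
        = (List.range weights.length).map (fun (k : Nat) => (k : Int)) := PySem.List.pyRange_zero_natCast _
    have hnd_idx : (PySem.List.pyRange 0 (weights.length : Int)).Nodup := by
      rw [hidx]
      exact List.nodup_range.map (fun a b hab => by exact_mod_cast hab)
    have hperm : (PySem.List.sorted2 (PySem.List.pyRange 0 (weights.length : Int))
        (fun index => PySem.List.pyGetD weights index 0) (fun index => -index) true).Perm
        (PySem.List.pyRange 0 (weights.length : Int)) := PySem.List.sorted2_perm _ _ _ _
    set ranked := PySem.List.sorted2 (PySem.List.pyRange 0 (weights.length : Int))
        (fun index => PySem.List.pyGetD weights index 0) (fun index => -index) true with hrdef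
    have hnd : ranked.Nodup := hperm.nodup_iff.mpr hnd_idx
    have hpw : ranked.Pairwise (fun a b => befB weights a b = true) := by
      rw [hrdef]
      exact foldl_insertBy_pairwise weights _ [] (by simp) hnd_idx List.Pairwise.nil
    rw [PySem.List.slice_to _ hrem]
    rw [incr_fold _ counts (hnd.sublist (List.take_sublist _ _)) ?bounds]
    case bounds =>
      intro t ht
      have h5 : t ∈ ranked := List.mem_of_mem_take ht
      have h6 := hperm.mem_iff.mp h5
      rw [hidx] at h6
      obtain ⟨j, hj, rfl⟩ := List.mem_map.mp h6
      rw [List.mem_range] at hj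
      rw [cl]
      omega
    apply List.map_congr_left
    intro k hk
    rw [List.mem_range, cl] at hk
    have hmemr : (k : Int) ∈ ranked := by
      rw [hperm.mem_iff, hidx]
      exact List.mem_map.mpr ⟨k, List.mem_range.mpr hk, rfl⟩
    have hmem := mem_take_iff_rank weights ranked hnd hpw (k : Int) hmemr (total - counts.sum).toNat
    have hcnt : ranked.countP (fun j => befB weights j (k : Int))
        = (List.range weights.length).countP (fun (j : Nat) =>
            decide (weights.getD k 0 < weights.getD j 0 ∨
              (weights.getD j 0 = weights.getD k 0 ∧ (j : Int) < (k : Int)))) := by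
      rw [hperm.countP_eq, hidx, List.countP_map]
      apply List.countP_congr
      intro j hj
      simp only [Function.comp_def, befB, getD_cast]
      simp
      omega
    have hiff : ((k : Int) ∈ ranked.take (total - counts.sum).toNat) ↔
        (((List.range weights.length).countP (fun (j : Nat) =>
            decide (weights.getD k 0 < weights.getD j 0 ∨
              (weights.getD j 0 = weights.getD k 0 ∧ (j : Int) < (k : Int)))) : Int)
          < total - counts.sum) := by
      rw [hmem, hcnt]
      omega
    by_cases hc : (((List.range weights.length).countP (fun (j : Nat) =>
        decide (weights.getD k 0 < weights.getD j 0 ∨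
          (weights.getD j 0 = weights.getD k 0 ∧ (j : Int) < (k : Int)))) : Int)
          < total - counts.sum)
    · rw [if_pos (hiff.mpr hc), if_pos hc]
    · rw [if_neg (fun hm => hc (hiff.mp hm)), if_neg hc]
      omega

-- ===== VERDICT (by name: the statement is the Claim_ definition above) =====
theorem split_weighted_spec : Claim_equal_split_weighted := by
  intro total weights _ hpre
  unfold Spec_split_weighted
  exact main_eq total weights hpre.1 hpre.2
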